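-- pv_equiv track=rewrite | github.com/diegopastor/competitiveProgramming | Misc./CF001/A.py | passwordNormalization
-- ===== SOURCE A (Python) =====
-- def passwordNormalization(password):
--     letters = []
--     nums = []
--     symbols = []
--     for char in password:
--         if char.isalpha():
--             letters.append(char)
--         elif char.isdigit():
--             nums.append(char)
--         else:
--             symbols.append(char)
--     letters = ''.join(letters)
--     nums = ''.join(nums)
--     symbols = ''.join(symbols)
--     normalized = letters + nums + symbols
--     return normalized
-- ===== SOURCE B (Python) =====
-- def passwordNormalization(password):
--     def key(char):
--         if char.isalpha():
--             return 0
--         elif char.isdigit():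
--             return 1
--         return 2
--     return ''.join(sorted(password, key=key))
-- ===== Notes on version B (the rewrite author's own statement) =====
-- stated objective: idiomatic
-- what changed: Replaces the three-bucket partition loop with a single stable sort by a 0/1/2 category key and one join.
import Mathlib
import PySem

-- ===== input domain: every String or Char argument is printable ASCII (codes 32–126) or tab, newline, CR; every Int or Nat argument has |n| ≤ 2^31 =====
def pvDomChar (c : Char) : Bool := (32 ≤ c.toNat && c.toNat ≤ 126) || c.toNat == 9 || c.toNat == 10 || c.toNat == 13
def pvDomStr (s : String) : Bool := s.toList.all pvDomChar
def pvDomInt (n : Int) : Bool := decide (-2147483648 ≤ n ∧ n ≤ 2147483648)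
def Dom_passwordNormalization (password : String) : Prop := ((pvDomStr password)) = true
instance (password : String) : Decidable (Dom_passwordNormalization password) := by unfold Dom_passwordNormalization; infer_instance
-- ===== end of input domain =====

-- B replaces A's three-bucket partition loop with one stable sort by a 0/1/2 category key (idiomatic; same result).


-- ===== PORT A =====
-- loop over the chars, appending to one of three buckets; then concatenate letters + nums + symbols
def passwordNormalization (password : String) : String :=
  let st := password.toList.foldl
    (fun (acc : List Char × List Char × List Char) char =>
      if PySem.Chars.isalpha char then (acc.1 ++ [char], acc.2.1, acc.2.2)
      else if PySem.Chars.isdigit char then (acc.1, acc.2.1 ++ [char], acc.2.2)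
      else (acc.1, acc.2.1, acc.2.2 ++ [char]))
    ([], [], [])
  String.ofList (st.1 ++ st.2.1 ++ st.2.2)

-- ===== PORT B =====
-- key(char): 0 if alpha, 1 elif digit, else 2
def pvKey (char : Char) : Int :=
  if PySem.Chars.isalpha char then 0
  else if PySem.Chars.isdigit char then 1
  else 2

-- ''.join(sorted(password, key=key))
def passwordNormalization_alt (password : String) : String :=
  String.ofList (PySem.List.sorted password.toList pvKey false)

-- ===== PRECONDITION & SPEC =====
def Spec_passwordNormalization (password : String) (out : String) : Prop := out = passwordNormalization_alt password
instance (password : String) (out : String) : Decidable (Spec_passwordNormalization password out) := by unfold Spec_passwordNormalization; infer_instance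

-- ===== CLAIM (what is proved, stated in full; the proofs are below) =====
def Claim_equal_passwordNormalization : Prop := ∀ (password : String), Dom_passwordNormalization password → Spec_passwordNormalization password (passwordNormalization password)

-- ===== LEMMAS AND PROOFS =====

-- inserting x between a prefix it does not go before and a suffix it goes before
theorem pvInsertBy_split {α : Type} (bef : α → α → Bool) (x : α) (p q : List α)
    (hp : ∀ y ∈ p, bef x y = false) (hq : ∀ y ∈ q, bef x y = true) :
    PySem.List.insertBy bef x (p ++ q) = p ++ x :: q := by
  induction p with
  | nil =>
    cases q with
    | nil => simp [PySem.List.insertBy]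
    | cons y ys => simp [PySem.List.insertBy, hq y (by simp)]
  | cons z zs ih =>
    simp only [List.cons_append, PySem.List.insertBy, hp z (by simp)]
    simp only [Bool.false_eq_true, if_false]
    rw [ih (fun y hy => hp y (by simp [hy]))]

-- A's loop computes the three category filters
theorem pvFoldA (xs : List Char) : ∀ (l n s : List Char),
    xs.foldl
      (fun (acc : List Char × List Char × List Char) char =>
        if PySem.Chars.isalpha char then (acc.1 ++ [char], acc.2.1, acc.2.2)
        else if PySem.Chars.isdigit char then (acc.1, acc.2.1 ++ [char], acc.2.2)
        else (acc.1, acc.2.1, acc.2.2 ++ [char]))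
      (l, n, s)
    = (l ++ xs.filter (fun c => pvKey c = 0),
       n ++ xs.filter (fun c => pvKey c = 1),
       s ++ xs.filter (fun c => pvKey c = 2)) := by
  induction xs with
  | nil => simp
  | cons x t ih =>
    intro l n s
    by_cases ha : PySem.Chars.isalpha x
    · simp [ha, ih, pvKey]
    · by_cases hd : PySem.Chars.isdigit x
      · simp [ha, hd, ih, pvKey]
      · simp [ha, hd, ih, pvKey]

-- the stable insertion sort over the 0/1/2 key keeps buckets a0,a1,a2 and appends within the bucket
theorem pvFoldB (xs : List Char) : ∀ (a0 a1 a2 : List Char),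
    (∀ c ∈ a0, pvKey c = 0) → (∀ c ∈ a1, pvKey c = 1) → (∀ c ∈ a2, pvKey c = 2) →
    xs.foldl (fun acc x => PySem.List.insertBy (fun a b => decide (pvKey a < pvKey b)) x acc)
      (a0 ++ a1 ++ a2)
    = (a0 ++ xs.filter (fun c => pvKey c = 0))
      ++ (a1 ++ xs.filter (fun c => pvKey c = 1))
      ++ (a2 ++ xs.filter (fun c => pvKey c = 2)) := by
  induction xs with
  | nil => intro a0 a1 a2 _ _ _; simp
  | cons x t ih =>
    intro a0 a1 a2 h0 h1 h2
    simp only [List.foldl_cons]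
    by_cases ha : PySem.Chars.isalpha x
    · have hx : pvKey x = 0 := by simp [pvKey, ha]
      rw [show a0 ++ a1 ++ a2 = a0 ++ (a1 ++ a2) by simp,
          pvInsertBy_split _ x a0 (a1 ++ a2)
            (fun y hy => by simp [h0 y hy, hx])
            (fun y hy => by
              rcases List.mem_append.mp hy with h | h
              · simp [h1 y h, hx]
              · simp [h2 y h, hx]),
          show a0 ++ x :: (a1 ++ a2) = (a0 ++ [x]) ++ a1 ++ a2 by simp]
      rw [ih (a0 ++ [x]) a1 a2
            (fun c hc => by rcases List.mem_append.mp hc with h | h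
                            · exact h0 c h
                            · simp at h; simp [h, hx]) h1 h2]
      simp [pvKey, ha]
    · by_cases hd : PySem.Chars.isdigit x
      · have hx : pvKey x = 1 := by simp [pvKey, ha, hd]
        rw [pvInsertBy_split _ x (a0 ++ a1) a2
              (fun y hy => by
                rcases List.mem_append.mp hy with h | h
                · simp [h0 y h, hx]
                · simp [h1 y h, hx])
              (fun y hy => by simp [h2 y hy, hx]),
            show (a0 ++ a1) ++ x :: a2 = a0 ++ (a1 ++ [x]) ++ a2 by simp]
        rw [ih a0 (a1 ++ [x]) a2 h0
              (fun c hc => by rcases List.mem_append.mp hc with h | h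
                              · exact h1 c h
                              · simp at h; simp [h, hx]) h2]
        simp [pvKey, ha, hd]
      · have hx : pvKey x = 2 := by simp [pvKey, ha, hd]
        rw [PySem.List.insertBy_of_forall_not_before _ x (a0 ++ a1 ++ a2)
              (fun y hy => by
                rcases List.mem_append.mp hy with h | h
                · rcases List.mem_append.mp h with h' | h'
                  · simp [h0 y h', hx]
                  · simp [h1 y h', hx]
                · simp [h2 y h, hx]),
            show (a0 ++ a1 ++ a2) ++ [x] = a0 ++ a1 ++ (a2 ++ [x]) by simp]
        rw [ih a0 a1 (a2 ++ [x]) h0 h1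
              (fun c hc => by rcases List.mem_append.mp hc with h | h
                              · exact h2 c h
                              · simp at h; simp [h, hx])]
        simp [pvKey, ha, hd]

theorem pvSorted_eq_filters (xs : List Char) :
    PySem.List.sorted xs pvKey false
    = xs.filter (fun c => pvKey c = 0) ++ xs.filter (fun c => pvKey c = 1)
      ++ xs.filter (fun c => pvKey c = 2) := by
  rw [PySem.List.sorted_eq_foldl_insertBy]
  have := pvFoldB xs [] [] [] (by simp) (by simp) (by simp)
  simpa using this

-- ===== VERDICT (by name: the statement is the Claim_ definition above) =====
theorem passwordNormalization_spec : Claim_equal_passwordNormalization := by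
  intro password _
  show passwordNormalization password = passwordNormalization_alt password
  unfold passwordNormalization passwordNormalization_alt
  rw [pvFoldA password.toList [] [] [], pvSorted_eq_filters]
  simp
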